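-- pv_equiv track=rewrite | github.com/Shikherneo2/OpenSeq2Seq | open_seq2seq/data/preprocess/text_to_sequence.py | separate_words
-- ===== SOURCE A (Python) =====
-- def separate_words(txt):
--     out = []
--     seq = ""
--     cont = False
--     for i in txt:
--         if( i.isalpha() ):
--             cont = True
--             seq+=i
--         elif( cont ):
--             out.append(seq)
--             seq=""
--             out.append(i)
--             cont = False
--         else:
--             out.append(i)
--     if seq!="":
--         out.append(seq)
--     return out
-- ===== SOURCE B (Python) =====
-- def separate_words(txt):
--     out = []
--     i = 0
--     n = len(txt)
--     while i < n:
--         if txt[i].isalpha():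
--             j = i
--             while j < n and txt[j].isalpha():
--                 j += 1
--             out.append(txt[i:j])
--             i = j
--         else:
--             out.append(txt[i])
--             i += 1
--     return out
-- ===== Notes on version B (the rewrite author's own statement) =====
-- stated objective: alternative
-- what changed: B replaces A's char-by-char state machine (cont flag + incremental string concatenation) with a two-pointer run scanner that slices each whole alpha run out of the text at once.
import Mathlib
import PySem

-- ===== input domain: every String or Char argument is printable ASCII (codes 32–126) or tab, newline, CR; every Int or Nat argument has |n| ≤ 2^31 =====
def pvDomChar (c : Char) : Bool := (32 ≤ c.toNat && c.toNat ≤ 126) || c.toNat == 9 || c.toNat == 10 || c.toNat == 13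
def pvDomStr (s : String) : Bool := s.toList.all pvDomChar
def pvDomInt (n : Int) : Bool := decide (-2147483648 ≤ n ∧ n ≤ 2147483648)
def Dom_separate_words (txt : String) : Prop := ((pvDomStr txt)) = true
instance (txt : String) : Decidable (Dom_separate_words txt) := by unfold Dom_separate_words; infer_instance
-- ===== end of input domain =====

-- B replaces A's char-by-char state machine (cont flag + incremental concatenation)
-- with a run scanner that emits each whole alpha run at once; same return value proved.

-- ===== PORT A =====
-- the for-loop over txt with state (out, seq, cont), then the final flush of seq
def sepGoA (cs : List Char) (out : List String) (seq : String) (cont : Bool) : List String :=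
  match cs with
  | [] => if seq ≠ "" then out ++ [seq] else out
  | c :: rest =>
      if PySem.Chars.isalpha c then
        sepGoA rest out (seq.push c) true
      else if cont then
        sepGoA rest (out ++ [seq, String.singleton c]) "" false
      else
        sepGoA rest (out ++ [String.singleton c]) seq cont

def separate_words (txt : String) : List String := sepGoA txt.toList [] "" false

-- ===== PORT B =====
-- the outer while loop; the inner `while j < n and txt[j].isalpha()` + slice txt[i:j]
-- is the leading alpha run, i.e. takeWhile/dropWhile from position i
def sepGoB (cs : List Char) : List String :=
  match cs with
  | [] => []
  | c :: rest =>
      if PySem.Chars.isalpha c then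
        String.ofList (c :: rest.takeWhile PySem.Chars.isalpha) ::
          sepGoB (rest.dropWhile PySem.Chars.isalpha)
      else
        String.singleton c :: sepGoB rest
  termination_by cs.length
  decreasing_by
  · simpa using Nat.lt_succ_of_le (List.length_dropWhile_le _ _)
  · simp

def separate_words_alt (txt : String) : List String := sepGoB txt.toList

-- ===== PRECONDITION & SPEC =====
def Spec_separate_words (txt : String) (out : List String) : Prop := out = separate_words_alt txt
instance (txt : String) (out : List String) : Decidable (Spec_separate_words txt out) := by unfold Spec_separate_words; infer_instance

-- ===== CLAIM (what is proved, stated in full; the proofs are below) =====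
def Claim_equal_separate_words : Prop := ∀ (txt : String), Dom_separate_words txt → Spec_separate_words txt (separate_words txt)

-- ===== LEMMAS AND PROOFS =====

lemma pvOfList_nil : String.ofList ([] : List Char) = "" := by
  apply String.toList_inj.mp; simp

lemma pvOfList_push (s : List Char) (c : Char) :
    (String.ofList s).push c = String.ofList (s ++ [c]) := by
  apply String.toList_inj.mp; simp

lemma pvSingleton_eq (c : Char) : String.singleton c = String.ofList [c] := by
  apply String.toList_inj.mp; simp

-- what a pending alpha run `seq` contributes in front of B's output for the rest
def sepEmit (seq : List Char) (cs : List Char) : List String :=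
  if seq = [] then sepGoB cs
  else String.ofList (seq ++ cs.takeWhile PySem.Chars.isalpha) ::
         sepGoB (cs.dropWhile PySem.Chars.isalpha)

lemma sepGoA_eq_emit (cs : List Char) : ∀ (out : List String) (seq : List Char),
    sepGoA cs out (String.ofList seq) (!seq.isEmpty) = out ++ sepEmit seq cs := by
  induction cs with
  | nil =>
      intro out seq
      cases seq with
      | nil => simp [sepGoA, sepEmit, sepGoB]
      | cons a s =>
          have hne : String.ofList (a :: s) ≠ "" := by
            rw [← pvOfList_nil]; simp
          simp [sepGoA, sepEmit, sepGoB, hne]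
  | cons c rest ih =>
      intro out seq
      by_cases hc : PySem.Chars.isalpha c = true
      · have h1 : (!(seq ++ [c]).isEmpty) = true := by simp
        rw [sepGoA, if_pos hc, pvOfList_push, ← h1, ih]
        cases seq with
        | nil => simp [sepEmit, sepGoB, hc]
        | cons a s => simp [sepEmit, hc]
      · cases seq with
        | nil =>
            rw [sepGoA, if_neg hc]
            simp only [List.isEmpty_nil, Bool.not_true, Bool.false_eq_true, if_false]
            have h2 := ih (out ++ [String.singleton c]) []
            rw [pvOfList_nil] at h2
            simp only [List.isEmpty_nil, Bool.not_true] at h2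
            rw [h2]
            simp [sepEmit, sepGoB, hc, pvSingleton_eq]
        | cons a s =>
            rw [sepGoA, if_neg hc]
            simp only [List.isEmpty_cons, Bool.not_false, if_true]
            have h2 := ih (out ++ [String.ofList (a :: s), String.singleton c]) []
            rw [pvOfList_nil] at h2
            simp only [List.isEmpty_nil, Bool.not_true] at h2
            rw [h2]
            simp [sepEmit, sepGoB, hc]

-- ===== VERDICT (by name: the statement is the Claim_ definition above) =====
theorem separate_words_spec : Claim_equal_separate_words := by
  intro txt _
  unfold Spec_separate_words separate_words separate_words_alt
  have h := sepGoA_eq_emit txt.toList [] []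
  rw [pvOfList_nil] at h
  simpa [sepEmit] using h
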